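-- pv_equiv track=rewrite | github.com/Kximikx/python_politex | Lablelvel.py | extreme
-- ===== SOURCE A (Python) =====
-- def extreme(nums, t, used, find_max):
--     current_value = None
--     current_index = -1
--
--     for _ in range(t):
--         best_value = None
--         best_index = -1
--
--         for i in range(len(nums)):
--             if used[i]:
--                 continue
--
--             if best_value is None:
--                 best_value = nums[i]
--                 best_index = i
--             else:
--                 if find_max:
--                     if nums[i] > best_value:
--                         best_value = nums[i]
--                         best_index = i
--                 else:
--                     if nums[i] < best_value:
--                         best_value = nums[i]
--                         best_index = i
--
--         used[best_index] = True # Позначення заданого елемента як використаног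
--         current_value = best_value
--         current_index = best_index
--
--     return current_value, current_index
-- ===== SOURCE B (Python) =====
-- def extreme(nums, t, used, find_max):
--     # Return-value equivalent to A; like A it marks the selected elements in `used`
--     # (A additionally sets used[-1] when it runs out of unused elements).
--     if t < 1:
--         return None, -1
--     idxs = [i for i in range(len(nums)) if not used[i]]
--     if len(idxs) < t:
--         return None, -1
--     key = (lambda i: (-nums[i], i)) if find_max else (lambda i: (nums[i], i))
--     idxs.sort(key=key)
--     for i in idxs[:t]:
--         used[i] = True
--     j = idxs[t - 1]
--     return nums[j], j
-- ===== Notes on version B (the rewrite author's own statement) =====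
-- stated objective: faster
-- what changed: A repeats a full linear scan of nums for each of the t rounds; B collects the unused indices once, sorts them by (value, index) (negated value for find_max) and reads off the t-th entry directly.
import Mathlib
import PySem

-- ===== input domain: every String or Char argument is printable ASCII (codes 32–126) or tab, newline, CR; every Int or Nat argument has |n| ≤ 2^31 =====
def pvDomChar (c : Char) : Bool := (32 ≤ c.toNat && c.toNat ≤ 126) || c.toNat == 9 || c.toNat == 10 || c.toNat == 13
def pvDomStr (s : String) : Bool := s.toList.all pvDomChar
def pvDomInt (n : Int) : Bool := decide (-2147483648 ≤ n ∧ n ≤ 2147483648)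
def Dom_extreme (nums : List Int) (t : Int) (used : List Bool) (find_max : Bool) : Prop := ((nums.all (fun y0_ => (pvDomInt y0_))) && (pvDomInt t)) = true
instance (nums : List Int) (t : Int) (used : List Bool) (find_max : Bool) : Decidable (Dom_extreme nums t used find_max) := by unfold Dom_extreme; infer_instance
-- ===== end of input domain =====

-- B replaces A's t passes of linear scanning by one sort of the unused indices by
-- (value, index) and direct selection of the t-th entry (faster; equivalence is about
-- the RETURN value — both mutate `used`, A additionally sets used[-1] when t exceeds
-- the number of unused elements).

-- ===== PORT A =====
-- inner loop body: one candidate i against the current (best_value, best_index)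
def scanStep (nums : List Int) (used : List Bool) (find_max : Bool)
    (st : Option Int × Int) (i : Int) : Option Int × Int :=
  if PySem.List.pyGetD used i false then st
  else
    match st with
    | (none, _) => (some (PySem.List.pyGetD nums i 0), i)
    | (some b, bi) =>
      if find_max then
        if PySem.List.pyGetD nums i 0 > b then (some (PySem.List.pyGetD nums i 0), i) else (some b, bi)
      else
        if PySem.List.pyGetD nums i 0 < b then (some (PySem.List.pyGetD nums i 0), i) else (some b, bi)

-- inner 'for i in range(len(nums))' loop
def extremeScan (nums : List Int) (used : List Bool) (find_max : Bool) : Option Int × Int :=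
  (PySem.List.pyRange 0 (nums.length : Int)).foldl (scanStep nums used find_max) (none, -1)

-- one iteration of the outer loop: scan, then used[best_index] = True
def extremeRound (nums : List Int) (find_max : Bool)
    (st : Option Int × Int × List Bool) : Option Int × Int × List Bool :=
  let bv := (extremeScan nums st.2.2 find_max).1
  let bi := (extremeScan nums st.2.2 find_max).2
  (bv, bi, PySem.List.pySetD st.2.2 bi true)

def extreme (nums : List Int) (t : Int) (used : List Bool) (find_max : Bool) : Option Int × Int :=
  let r := (PySem.List.pyRange 0 t).foldl (fun st _ => extremeRound nums find_max st)
      ((none : Option Int), (-1 : Int), used)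
  (r.1, r.2.1)

-- ===== PORT B =====
-- [i for i in range(len(nums)) if not used[i]]
def unusedIdx (nums : List Int) (used : List Bool) : List Int :=
  (PySem.List.pyRange 0 (nums.length : Int)).filter (fun i => !PySem.List.pyGetD used i false)

-- key = (lambda i: (-nums[i], i)) if find_max else (lambda i: (nums[i], i));
-- Lex (Int × Int) is exactly Python's lexicographic tuple comparison on int pairs
def bKey (nums : List Int) (find_max : Bool) (i : Int) : Lex (Int × Int) :=
  toLex ((if find_max then -PySem.List.pyGetD nums i 0 else PySem.List.pyGetD nums i 0), i)

def extreme_alt (nums : List Int) (t : Int) (used : List Bool) (find_max : Bool) : Option Int × Int :=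
  if t < 1 then (none, -1)
  else
    let idxs := unusedIdx nums used
    if (idxs.length : Int) < t then (none, -1)
    else
      let s := PySem.List.sorted idxs (bKey nums find_max)
      let j := PySem.List.pyGetD s (t - 1) 0
      (some (PySem.List.pyGetD nums j 0), j)

-- ===== PRECONDITION & SPEC =====
-- Pre_ excludes exactly the inputs where A raises: with t ≥ 1 A indexes used[i] for every
-- i < len(nums) (IndexError if used is shorter) and executes used[-1] = True when it runs
-- out of unused elements (IndexError if used == []).
def Pre_extreme (nums : List Int) (t : Int) (used : List Bool) (find_max : Bool) : Prop :=
  1 ≤ t → (nums.length ≤ used.length ∧ used ≠ [])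
instance (nums : List Int) (t : Int) (used : List Bool) (find_max : Bool) : Decidable (Pre_extreme nums t used find_max) := by unfold Pre_extreme; infer_instance
def pvWitness_extreme : List Int × Int × List Bool × Bool := ([3, 1, 2], 2, [false, false, false], true)

def Spec_extreme (nums : List Int) (t : Int) (used : List Bool) (find_max : Bool) (out : Option Int × Int) : Prop := out = extreme_alt nums t used find_max
instance (nums : List Int) (t : Int) (used : List Bool) (find_max : Bool) (out : Option Int × Int) : Decidable (Spec_extreme nums t used find_max out) := by unfold Spec_extreme; infer_instance

-- ===== CLAIM (what is proved, stated in full; the proofs are below) =====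
def Claim_equal_extreme : Prop := ∀ (nums : List Int) (t : Int) (used : List Bool) (find_max : Bool), Dom_extreme nums t used find_max → Pre_extreme nums t used find_max → Spec_extreme nums t used find_max (extreme nums t used find_max)
-- ===== LEMMAS AND PROOFS =====

lemma bKey_lt_iff (nums : List Int) (fm : Bool) (i j : Int) (h : j < i) :
    (bKey nums fm i < bKey nums fm j) ↔
      (if fm then PySem.List.pyGetD nums j 0 < PySem.List.pyGetD nums i 0
       else PySem.List.pyGetD nums i 0 < PySem.List.pyGetD nums j 0) := by
  unfold bKey
  rw [Prod.Lex.toLex_lt_toLex]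
  cases fm <;> simp <;> omega

lemma bKey_inj (nums : List Int) (fm : Bool) {i j : Int}
    (hij : bKey nums fm i = bKey nums fm j) : i = j := by
  unfold bKey at hij
  have := congrArg (fun x => (ofLex x).2) hij
  simpa using this

lemma pyRange_zero_pairwise (n : Nat) :
    List.Pairwise (· < ·) (PySem.List.pyRange 0 (n : Int)) := by
  rw [PySem.List.pyRange_zero_natCast]
  exact List.Pairwise.map _ (by intro a b hab; exact_mod_cast hab) List.pairwise_lt_range

lemma pyRange_zero_nodup (n : Nat) : (PySem.List.pyRange 0 (n : Int)).Nodup := by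
  exact (pyRange_zero_pairwise n).imp (fun h => by omega)

lemma unusedIdx_nodup (nums : List Int) (used : List Bool) : (unusedIdx nums used).Nodup :=
  (pyRange_zero_nodup nums.length).filter _

lemma mem_unusedIdx (nums : List Int) (used : List Bool) (i : Int) :
    i ∈ unusedIdx nums used ↔ (0 ≤ i ∧ i < (nums.length : Int)) ∧ PySem.List.pyGetD used i false = false := by
  unfold unusedIdx
  rw [List.mem_filter, PySem.List.mem_pyRange_one]
  simp

lemma unusedIdx_empty_set (nums : List Int) (used : List Bool)
    (h : unusedIdx nums used = []) (k : Nat) :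
    unusedIdx nums (used.set k true) = [] := by
  unfold unusedIdx at *
  rw [List.filter_eq_nil_iff] at *
  intro i hi
  have h0 : (0:Int) ≤ i := ((PySem.List.mem_pyRange_one).1 hi).1
  have hu : PySem.List.pyGetD used i false = true := by simpa using h i hi
  simp only [Bool.not_eq_true', Bool.not_eq_eq_eq_not, Bool.not_true]
  by_cases hlen : i < (used.length : Int)
  · rw [PySem.List.pyGetD_eq_getElem _ _ h0 (by simpa using hlen)] at hu
    rw [PySem.List.pyGetD_eq_getElem _ _ h0 (by simpa using hlen), List.getElem_set]
    split <;> simp [hu]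
  · exfalso
    have hn : PySem.List.pyGet? used i = none := by
      rw [PySem.List.pyGet?_eq_none_iff]
      simp [PySem.Raise.InRange]
      omega
    rw [show PySem.List.pyGetD used i false = (PySem.List.pyGet? used i).getD false from rfl, hn] at hu
    exact Bool.false_ne_true hu

lemma scan_min (nums : List Int) (used : List Bool) (fm : Bool) :
    ∀ (L : List Int) (j : Int), List.Pairwise (· < ·) (j :: L) →
    ∃ m : Int,
      L.foldl (scanStep nums used fm) (some (PySem.List.pyGetD nums j 0), j) =
        (some (PySem.List.pyGetD nums m 0), m) ∧
      (m = j ∨ (m ∈ L ∧ PySem.List.pyGetD used m false = false)) ∧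
      bKey nums fm m ≤ bKey nums fm j ∧
      (∀ i ∈ L, PySem.List.pyGetD used i false = false → bKey nums fm m ≤ bKey nums fm i) := by
  intro L
  induction L with
  | nil =>
    intro j _
    exact ⟨j, rfl, Or.inl rfl, le_refl _, by simp⟩
  | cons x L ih =>
    intro j hp
    have hjx : j < x := (List.pairwise_cons.1 hp).1 x (by simp)
    have hpL : List.Pairwise (· < ·) (j :: L) := by
      have := List.Pairwise.sublist (l₁ := j :: L) ?_ hp
      · exact this
      · exact List.Sublist.cons₂ j (List.sublist_cons_self x L)
    rw [List.foldl_cons]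
    by_cases hx : PySem.List.pyGetD used x false = true
    · rw [show scanStep nums used fm (some (PySem.List.pyGetD nums j 0), j) x
            = (some (PySem.List.pyGetD nums j 0), j) by unfold scanStep; rw [hx]; simp]
      obtain ⟨m, h1, h2, h3, h4⟩ := ih j hpL
      refine ⟨m, h1, ?_, h3, ?_⟩
      · rcases h2 with h | ⟨hm, hmu⟩
        · exact Or.inl h
        · exact Or.inr ⟨by simp [hm], hmu⟩
      · intro i hi hiu
        rcases List.mem_cons.1 hi with rfl | hi'
        · rw [hiu] at hx; exact absurd hx (by simp)
        · exact h4 i hi' hiu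
    · have hx' : PySem.List.pyGetD used x false = false := by
        cases hhh : PySem.List.pyGetD used x false
        · rfl
        · exact absurd hhh hx
      -- does the candidate x replace j?
      by_cases htake : bKey nums fm x < bKey nums fm j
      · -- step takes x
        have hstep : scanStep nums used fm (some (PySem.List.pyGetD nums j 0), j) x
            = (some (PySem.List.pyGetD nums x 0), x) := by
          unfold scanStep
          rw [hx']
          have := (bKey_lt_iff nums fm x j hjx).1 htake
          cases fm <;> simp at this ⊢ <;> simp [this]
        rw [hstep]
        have hpx : List.Pairwise (· < ·) (x :: L) := (List.pairwise_cons.1 hp).2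
        obtain ⟨m, h1, h2, h3, h4⟩ := ih x hpx
        refine ⟨m, h1, ?_, le_of_lt (lt_of_le_of_lt h3 htake), ?_⟩
        · rcases h2 with rfl | ⟨hm, hmu⟩
          · exact Or.inr ⟨by simp, hx'⟩
          · exact Or.inr ⟨by simp [hm], hmu⟩
        · intro i hi hiu
          rcases List.mem_cons.1 hi with rfl | hi'
          · exact h3
          · exact h4 i hi' hiu
      · -- step keeps j
        have hkeep : bKey nums fm j ≤ bKey nums fm x := le_of_not_gt htake
        have hstep : scanStep nums used fm (some (PySem.List.pyGetD nums j 0), j) x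
            = (some (PySem.List.pyGetD nums j 0), j) := by
          unfold scanStep
          rw [hx']
          have := (bKey_lt_iff nums fm x j hjx).not.1 htake
          cases fm <;> simp at this ⊢ <;> omega
        rw [hstep]
        obtain ⟨m, h1, h2, h3, h4⟩ := ih j hpL
        refine ⟨m, h1, ?_, h3, ?_⟩
        · rcases h2 with h | ⟨hm, hmu⟩
          · exact Or.inl h
          · exact Or.inr ⟨by simp [hm], hmu⟩
        · intro i hi hiu
          rcases List.mem_cons.1 hi with rfl | hi'
          · exact le_trans h3 hkeep
          · exact h4 i hi' hiu

lemma sorted_pairwise_strict (nums : List Int) (used : List Bool) (fm : Bool) :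
    List.Pairwise (fun a b => bKey nums fm a < bKey nums fm b)
      (PySem.List.sorted (unusedIdx nums used) (bKey nums fm)) := by
  have h1 := PySem.List.sorted_pairwise (unusedIdx nums used) (bKey nums fm)
  have h2 : (PySem.List.sorted (unusedIdx nums used) (bKey nums fm)).Nodup :=
    (PySem.List.sorted_perm (unusedIdx nums used) (bKey nums fm) false).nodup_iff.2
      (unusedIdx_nodup nums used)
  exact (h1.and h2).imp (fun ⟨hle, hne⟩ =>
    lt_of_le_of_ne hle (fun he => hne (bKey_inj nums fm he)))

-- the scan walks until the first unused index, then scan_min takes over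

lemma scan_start (nums : List Int) (used : List Bool) (fm : Bool) :
    ∀ (L : List Int), List.Pairwise (· < ·) L →
    (L.filter (fun i => !PySem.List.pyGetD used i false) = [] →
      L.foldl (scanStep nums used fm) (none, -1) = (none, -1)) ∧
    (∀ j rest, L.filter (fun i => !PySem.List.pyGetD used i false) = j :: rest →
      ∃ m : Int, L.foldl (scanStep nums used fm) (none, -1) = (some (PySem.List.pyGetD nums m 0), m) ∧
        m ∈ L ∧ PySem.List.pyGetD used m false = false ∧
        (∀ i ∈ L, PySem.List.pyGetD used i false = false → bKey nums fm m ≤ bKey nums fm i)) := by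
  intro L hp
  induction L with
  | nil => exact ⟨fun _ => rfl, fun j rest h => by simp at h⟩
  | cons x L ih =>
    obtain ⟨ihe, ihs⟩ := ih (List.pairwise_cons.1 hp).2
    by_cases hx : PySem.List.pyGetD used x false = true
    · have hfe : (x :: L).filter (fun i => !PySem.List.pyGetD used i false)
          = L.filter (fun i => !PySem.List.pyGetD used i false) := by
        simp [List.filter_cons, hx]
      have hstep : scanStep nums used fm (none, -1) x = (none, -1) := by
        unfold scanStep; rw [hx]; simp
      constructor
      · intro he
        rw [List.foldl_cons, hstep]
        exact ihe (by rw [← hfe]; exact he)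
      · intro j rest hf
        obtain ⟨m, h1, h2, h3, h4⟩ := ihs j rest (by rw [← hfe]; exact hf)
        rw [List.foldl_cons, hstep]
        refine ⟨m, h1, by simp [h2], h3, ?_⟩
        intro i hi hiu
        rcases List.mem_cons.1 hi with rfl | hi'
        · rw [hiu] at hx; exact absurd hx (by simp)
        · exact h4 i hi' hiu
    · have hx' : PySem.List.pyGetD used x false = false := by
        cases hhh : PySem.List.pyGetD used x false
        · rfl
        · exact absurd hhh hx
      have hstep : scanStep nums used fm (none, -1) x
          = (some (PySem.List.pyGetD nums x 0), x) := by
        unfold scanStep; rw [hx']; simp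
      constructor
      · intro he
        simp [List.filter_cons, hx'] at he
      · intro j rest hf
        rw [List.foldl_cons, hstep]
        obtain ⟨m, h1, h2, h3, h4⟩ := scan_min nums used fm L x hp
        refine ⟨m, h1, ?_, ?_, ?_⟩
        · rcases h2 with rfl | ⟨hm, _⟩
          · simp
          · simp [hm]
        · rcases h2 with rfl | ⟨_, hmu⟩
          · exact hx'
          · exact hmu
        · intro i hi hiu
          rcases List.mem_cons.1 hi with rfl | hi'
          · exact h3
          · exact h4 i hi' hiu

lemma scan_eq (nums : List Int) (used : List Bool) (fm : Bool) :
    extremeScan nums used fm =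
      match PySem.List.sorted (unusedIdx nums used) (bKey nums fm) with
      | [] => (none, -1)
      | j :: _ => (some (PySem.List.pyGetD nums j 0), j) := by
  have hp := pyRange_zero_pairwise nums.length
  obtain ⟨he, hs⟩ := scan_start nums used fm _ hp
  cases hsrt : PySem.List.sorted (unusedIdx nums used) (bKey nums fm) with
  | nil =>
    have : unusedIdx nums used = [] := (PySem.List.sorted_eq_nil_iff _ _ _).1 hsrt
    exact he this
  | cons j rest =>
    have hU : unusedIdx nums used ≠ [] := by
      intro h
      rw [h] at hsrt
      simp [(PySem.List.sorted_eq_nil_iff ([]:List Int) (bKey nums fm) false).2 rfl] at hsrt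
    cases hUc : unusedIdx nums used with
    | nil => exact absurd hUc hU
    | cons u us =>
      obtain ⟨m, h1, h2, h3, h4⟩ := hs u us hUc
      rw [show extremeScan nums used fm
          = (PySem.List.pyRange 0 (nums.length : Int)).foldl (scanStep nums used fm) (none, -1) from rfl, h1]
      -- m = j
      have hjU : j ∈ unusedIdx nums used := by
        rw [← PySem.List.mem_sorted (unusedIdx nums used) (bKey nums fm) false, hsrt]; simp
      have hmU : m ∈ unusedIdx nums used := by
        rw [mem_unusedIdx]
        have hmR : m ∈ PySem.List.pyRange 0 ((nums.length:Nat) : Int) := h2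
        exact ⟨PySem.List.mem_pyRange_one.1 hmR, h3⟩
      -- j is minimal over U
      have hjmin : ∀ i ∈ unusedIdx nums used, bKey nums fm j ≤ bKey nums fm i := by
        intro i hi
        have : i ∈ PySem.List.sorted (unusedIdx nums used) (bKey nums fm) :=
          (PySem.List.mem_sorted _ _ _ _).2 hi
        rw [hsrt] at this
        rcases List.mem_cons.1 this with rfl | hi'
        · exact le_refl _
        · have := PySem.List.sorted_pairwise (unusedIdx nums used) (bKey nums fm)
          rw [hsrt] at this
          exact (List.pairwise_cons.1 this).1 i hi'
      have hmmin : bKey nums fm m ≤ bKey nums fm j := by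
        apply h4 j _ ((mem_unusedIdx nums used j).1 hjU).2
        exact List.mem_of_mem_filter hjU
      have : m = j := bKey_inj nums fm (le_antisymm hmmin (hjmin m hmU))
      rw [this]

lemma unusedIdx_set (nums : List Int) (used : List Bool) (j : Int)
    (hj0 : 0 ≤ j) (hjn : j < (nums.length : Int)) (hlen : nums.length ≤ used.length) :
    unusedIdx nums (used.set j.toNat true) = (unusedIdx nums used).filter (· != j) := by
  unfold unusedIdx
  rw [List.filter_filter]
  apply List.filter_congr
  intro i hi
  have h0 : (0:Int) ≤ i := (PySem.List.mem_pyRange_one.1 hi).1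
  have h1 : i < (nums.length : Int) := (PySem.List.mem_pyRange_one.1 hi).2
  have hiu : i < (used.length : Int) := by omega
  rw [PySem.List.pyGetD_eq_getElem used _ h0 (by simpa using hiu)]
  rw [PySem.List.pyGetD_eq_getElem (used.set j.toNat true) _ h0 (by simp; omega)]
  rw [List.getElem_set]
  by_cases hij : i = j
  · subst hij
    simp
  · have : j.toNat ≠ i.toNat := by omega
    simp [this, bne]
    intro _; exact hij

lemma sorted_tail (nums : List Int) (used : List Bool) (fm : Bool) (j : Int) (rest : List Int)
    (hlen : nums.length ≤ used.length)
    (h : PySem.List.sorted (unusedIdx nums used) (bKey nums fm) = j :: rest) :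
    PySem.List.sorted (unusedIdx nums (used.set j.toNat true)) (bKey nums fm) = rest := by
  have hperm : (j :: rest).Perm (unusedIdx nums used) := by
    rw [← h]; exact PySem.List.sorted_perm _ _ _
  have hjU : j ∈ unusedIdx nums used := hperm.mem_iff.1 (by simp)
  have hj0 : (0:Int) ≤ j := by
    have := List.mem_filter.1 hjU
    exact (PySem.List.mem_pyRange_one.1 this.1).1
  have hjn : j < (nums.length : Int) := by
    have := List.mem_filter.1 hjU
    exact (PySem.List.mem_pyRange_one.1 this.1).2
  apply PySem.List.sorted_eq_of_perm_of_pairwise_lt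
  · -- rest ~ unusedIdx (set)
    rw [unusedIdx_set nums used j hj0 hjn hlen,
        ← List.Nodup.erase_eq_filter (unusedIdx_nodup nums used) j]
    have h2 : (unusedIdx nums used).Perm (j :: (unusedIdx nums used).erase j) :=
      List.perm_cons_erase hjU
    exact (hperm.trans h2).cons_inv
  · have := sorted_pairwise_strict nums used fm
    rw [h] at this
    exact (List.pairwise_cons.1 this).2

lemma pySetD_neg_one (used : List Bool) (hne : used ≠ []) (v : Bool) :
    PySem.List.pySetD used (-1) v = used.set (used.length - 1) v := by
  have hlen : 1 ≤ used.length := List.length_pos_iff.2 hne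
  simp [PySem.List.pySetD, PySem.List.pySet?, PySem.List.pyIdx?]
  simp [hlen]

lemma outer (nums : List Int) (fm : Bool) :
    ∀ (L : List Int) (used : List Bool) (cv : Option Int) (ci : Int),
    nums.length ≤ used.length → used ≠ [] →
    (let s := PySem.List.sorted (unusedIdx nums used) (bKey nums fm)
     let r := L.foldl (fun st _ => extremeRound nums fm st) (cv, ci, used)
     (r.1, r.2.1) =
       if L.length = 0 then (cv, ci)
       else if L.length ≤ s.length then
         (some (PySem.List.pyGetD nums (s.getD (L.length - 1) 0) 0), s.getD (L.length - 1) 0)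
       else (none, -1)) := by
  intro L
  induction L with
  | nil => intro used cv ci _ _; simp
  | cons x L ih =>
    intro used cv ci hlen hne
    simp only [List.foldl_cons, List.length_cons]
    cases hsrt : PySem.List.sorted (unusedIdx nums used) (bKey nums fm) with
    | nil =>
      have hU : unusedIdx nums used = [] := (PySem.List.sorted_eq_nil_iff _ _ _).1 hsrt
      have hround : extremeRound nums fm (cv, ci, used)
          = (none, -1, used.set (used.length - 1) true) := by
        unfold extremeRound
        rw [scan_eq nums used fm, hsrt]
        simp [pySetD_neg_one used hne]
      rw [hround]
      have hU' : unusedIdx nums (used.set (used.length - 1) true) = [] :=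
        unusedIdx_empty_set nums used hU _
      have := ih (used.set (used.length - 1) true) none (-1) (by simpa using hlen)
        (by simp [List.ne_nil_iff_length_pos] at hne ⊢; omega)
      simp only [(PySem.List.sorted_eq_nil_iff _ _ _).2 hU'] at this
      rw [this]
      split <;> split <;> simp_all
    | cons j rest =>
      have hjU : j ∈ unusedIdx nums used := by
        have : j ∈ PySem.List.sorted (unusedIdx nums used) (bKey nums fm) := by rw [hsrt]; simp
        exact (PySem.List.mem_sorted _ _ _ _).1 this
      obtain ⟨⟨hj0, hjn⟩, hju⟩ := (mem_unusedIdx nums used j).1 hjU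
      have hround : extremeRound nums fm (cv, ci, used)
          = (some (PySem.List.pyGetD nums j 0), j, used.set j.toNat true) := by
        unfold extremeRound
        rw [scan_eq nums used fm, hsrt]
        simp [PySem.List.pySetD_of_nonneg _ _ hj0]
      rw [hround]
      have hlen' : nums.length ≤ (used.set j.toNat true).length := by simpa using hlen
      have hne' : used.set j.toNat true ≠ [] := by
        simp [List.ne_nil_iff_length_pos] at hne ⊢; omega
      have hrest := sorted_tail nums used fm j rest hlen hsrt
      have := ih (used.set j.toNat true) (some (PySem.List.pyGetD nums j 0)) j hlen' hne'
      simp only [hrest] at this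
      rw [this]
      cases hL : L.length with
      | zero => simp
      | succ k =>
        simp only [hL, List.length_cons]
        by_cases hk : k + 1 ≤ rest.length
        · rw [if_neg (by omega), if_pos hk, if_neg (by omega), if_pos (by simp; omega)]
          simp
        · rw [if_neg (by omega), if_neg hk, if_neg (by omega), if_neg (by simp; omega)]

lemma length_pyRange_zero (t : Int) : (PySem.List.pyRange 0 t).length = t.toNat := by
  rw [PySem.List.pyRange_of_pos 0 t (by norm_num)]
  split <;> simp <;> omega

lemma pyRange_zero_nil (t : Int) (h : t < 1) : PySem.List.pyRange 0 t = [] :=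
  List.length_eq_zero_iff.1 (by rw [length_pyRange_zero]; omega)

lemma extreme_eq_alt (nums : List Int) (t : Int) (used : List Bool) (find_max : Bool)
    (hPre : Pre_extreme nums t used find_max) :
    extreme nums t used find_max = extreme_alt nums t used find_max := by
  by_cases ht : t < 1
  · unfold extreme extreme_alt
    rw [pyRange_zero_nil t ht, if_pos ht]
    rfl
  · have ht1 : 1 ≤ t := by omega
    obtain ⟨hlen, hne⟩ := hPre ht1
    have h := outer nums find_max (PySem.List.pyRange 0 t) used none (-1) hlen hne
    simp only [length_pyRange_zero] at h
    unfold extreme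
    rw [h]
    have halt : extreme_alt nums t used find_max
        = if t < 1 then (none, -1)
          else if ((unusedIdx nums used).length : Int) < t then (none, -1)
          else (some (PySem.List.pyGetD nums (PySem.List.pyGetD (PySem.List.sorted (unusedIdx nums used) (bKey nums find_max)) (t - 1) 0) 0),
                PySem.List.pyGetD (PySem.List.sorted (unusedIdx nums used) (bKey nums find_max)) (t - 1) 0) := by
      simp only [extreme_alt]
    rw [halt, if_neg ht]
    set s := PySem.List.sorted (unusedIdx nums used) (bKey nums find_max) with hs
    have hslen : s.length = (unusedIdx nums used).length := PySem.List.length_sorted _ _ _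
    rw [if_neg (by omega : ¬ t.toNat = 0)]
    by_cases hts : t.toNat ≤ s.length
    · have hts2 : t.toNat ≤ (unusedIdx nums used).length := by rw [← hslen]; exact hts
      rw [if_pos hts, if_neg (by omega : ¬ ((unusedIdx nums used).length : Int) < t)]
      have hj : PySem.List.pyGetD s (t - 1) 0 = s.getD (t.toNat - 1) 0 := by
        rw [show PySem.List.pyGetD s (t-1) 0 = (PySem.List.pyGet? s (t-1)).getD 0 from rfl,
            PySem.List.pyGet?_of_nonneg s (by omega : (0:Int) ≤ t - 1)]
        rw [List.getD_eq_getElem?_getD, show (t-1).toNat = t.toNat - 1 by omega]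
      rw [hj]
    · have hts2 : ¬ t.toNat ≤ (unusedIdx nums used).length := by rw [← hslen]; exact hts
      rw [if_neg hts, if_pos (by omega : ((unusedIdx nums used).length : Int) < t)]

-- ===== VERDICT (by name: the statement is the Claim_ definition above) =====
theorem extreme_spec : Claim_equal_extreme := by
  intro nums t used find_max _ hPre
  unfold Spec_extreme
  exact extreme_eq_alt nums t used find_max hPre
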